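-- pv_equiv track=rewrite | github.com/TheClitCommander/Minerva | web/response_generator.py | select_models_for_query
-- ===== SOURCE A (Python) =====
-- from typing import Dict, List, Any, Optional, Tuple, Union
--
-- TECHNICAL_TAGS = ["code", "programming", "technical", "algorithm", "science", "math"]
--
-- CREATIVE_TAGS = ["creative", "writing", "story", "design", "artistic", "novel"]
--
-- FACTUAL_TAGS = ["facts", "history", "data", "information", "research"]
--
-- COMPARISON_TAGS = ["comparison", "contrast", "versus", "vs", "difference", "compare"]
--
-- EXPLANATION_TAGS = ["explain", "explanation", "describe", "clarify", "elaborate"]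
--
-- def select_models_for_query(query: str, user_prefs: Dict[str, Any], context: Dict[str, Any]) -> List[str]:
--     """
--     Select appropriate models based on query type and user preferences.
--
--     Args:
--         query: The user's query
--         user_prefs: User preferences
--         context: Additional context information
--
--     Returns:
--         List of model identifiers to use
--     """
--     # Extract query tags if available
--     tags = context.get("tags", [])
--
--     # Define models to use based on query characteristics
--     models = []
--
--     # Check for technical content
--     if any(tag in TECHNICAL_TAGS for tag in tags):
--         models.extend(["gpt4", "claude3"])
--
--     # Check for creative content
--     elif any(tag in CREATIVE_TAGS for tag in tags):
--         models.extend(["claude3", "gemini"])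
--
--     # Check for factual content
--     elif any(tag in FACTUAL_TAGS for tag in tags):
--         models.extend(["gpt4", "claude3"])
--
--     # Check for comparison requests
--     elif any(tag in COMPARISON_TAGS for tag in tags):
--         models.extend(["gpt4", "claude3", "gemini"])
--
--     # Check for explanation requests
--     elif any(tag in EXPLANATION_TAGS for tag in tags):
--         models.extend(["gpt4", "claude3"])
--
--     # Default model selection
--     if not models:
--         models = ["gpt-3.5-turbo", "gpt4"]
--
--     # Add user preferred models if specified
--     preferred_models = user_prefs.get("preferred_models", [])
--     if preferred_models:
--         # Ensure preferred models are prioritized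
--         for model in preferred_models:
--             if model not in models:
--                 models.insert(0, model)
--
--     # Limit to 3 models maximum for efficiency
--     return models[:3]
-- ===== SOURCE B (Python) =====
-- TECHNICAL_TAGS = ["code", "programming", "technical", "algorithm", "science", "math"]
-- CREATIVE_TAGS = ["creative", "writing", "story", "design", "artistic", "novel"]
-- FACTUAL_TAGS = ["facts", "history", "data", "information", "research"]
-- COMPARISON_TAGS = ["comparison", "contrast", "versus", "vs", "difference", "compare"]
-- EXPLANATION_TAGS = ["explain", "explanation", "describe", "clarify", "elaborate"]
--
-- _CATEGORY_TAG_LISTS = [TECHNICAL_TAGS, CREATIVE_TAGS, FACTUAL_TAGS,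
--                        COMPARISON_TAGS, EXPLANATION_TAGS]
-- # models per category index; index 5 = "no category matched" default
-- _MODELS_BY_CATEGORY = [
--     ["gpt4", "claude3"],
--     ["claude3", "gemini"],
--     ["gpt4", "claude3"],
--     ["gpt4", "claude3", "gemini"],
--     ["gpt4", "claude3"],
--     ["gpt-3.5-turbo", "gpt4"],
-- ]
-- # each tag names exactly one category, so classify tags individually
-- _TAG_CATEGORY = {t: i for i, ts in enumerate(_CATEGORY_TAG_LISTS) for t in ts}
--
-- def select_models_for_query(query, user_prefs, context):
--     # classify each tag on its own and keep the highest-priority (lowest) category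
--     idx = 5
--     for t in context.get("tags", []):
--         idx = min(idx, _TAG_CATEGORY.get(t, 5))
--     models = _MODELS_BY_CATEGORY[idx]
--     # preferred models end up in front, newest-first, without duplicates:
--     # filter out those already present, dedupe keeping first occurrences, reverse
--     new = [m for m in user_prefs.get("preferred_models", []) if m not in models]
--     front = list(dict.fromkeys(new))
--     front.reverse()
--     return (front + models)[:3]
-- ===== Notes on version B (the rewrite author's own statement) =====
-- stated objective: alternative
-- what changed: B classifies each tag individually via a precomputed tag-to-category map and keeps the minimum category index (instead of A's per-category any()-scans in an if/elif chain), then builds the preferred-model prefix by staged passes (filter out present models, dedupe first occurrences, reverse, concatenate) instead of A's repeated insert(0, m) loop.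
import Mathlib
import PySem

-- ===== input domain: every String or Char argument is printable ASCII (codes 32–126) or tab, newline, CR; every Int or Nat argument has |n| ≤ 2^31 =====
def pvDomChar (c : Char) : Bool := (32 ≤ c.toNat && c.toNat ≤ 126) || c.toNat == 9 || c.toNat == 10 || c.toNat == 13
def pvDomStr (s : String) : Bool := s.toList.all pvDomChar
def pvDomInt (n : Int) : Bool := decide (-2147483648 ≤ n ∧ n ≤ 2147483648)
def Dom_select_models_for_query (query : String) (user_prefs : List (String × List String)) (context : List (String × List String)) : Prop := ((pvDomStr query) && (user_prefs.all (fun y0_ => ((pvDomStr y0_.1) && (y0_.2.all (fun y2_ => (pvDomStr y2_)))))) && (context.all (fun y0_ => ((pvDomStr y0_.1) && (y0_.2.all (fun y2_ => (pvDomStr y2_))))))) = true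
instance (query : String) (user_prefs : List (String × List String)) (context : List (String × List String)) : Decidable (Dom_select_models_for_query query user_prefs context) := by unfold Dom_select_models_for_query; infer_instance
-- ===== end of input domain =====

-- B classifies each tag individually through a precomputed tag→category-index map and keeps the
-- minimum index (instead of A's per-category any() if/elif chain), and builds the preferred-model
-- prefix by staged passes (filter, ordered dedup, reverse, concat) instead of repeated insert(0, m)
-- (objective: alternative).

-- ===== PORT A =====
def TECHNICAL_TAGS : List String := ["code", "programming", "technical", "algorithm", "science", "math"]
def CREATIVE_TAGS : List String := ["creative", "writing", "story", "design", "artistic", "novel"]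
def FACTUAL_TAGS : List String := ["facts", "history", "data", "information", "research"]
def COMPARISON_TAGS : List String := ["comparison", "contrast", "versus", "vs", "difference", "compare"]
def EXPLANATION_TAGS : List String := ["explain", "explanation", "describe", "clarify", "elaborate"]

def select_models_for_query (query : String) (user_prefs : List (String × List String)) (context : List (String × List String)) : List String :=
  let tags := PySem.Dict.getD (PySem.Dict.mk context) "tags" []
  let models : List String :=
    if tags.any (fun tag => TECHNICAL_TAGS.contains tag) then ["gpt4", "claude3"]
    else if tags.any (fun tag => CREATIVE_TAGS.contains tag) then ["claude3", "gemini"]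
    else if tags.any (fun tag => FACTUAL_TAGS.contains tag) then ["gpt4", "claude3"]
    else if tags.any (fun tag => COMPARISON_TAGS.contains tag) then ["gpt4", "claude3", "gemini"]
    else if tags.any (fun tag => EXPLANATION_TAGS.contains tag) then ["gpt4", "claude3"]
    else []
  let models := if models = [] then ["gpt-3.5-turbo", "gpt4"] else models
  let preferred_models := PySem.Dict.getD (PySem.Dict.mk user_prefs) "preferred_models" []
  -- for model in preferred_models: if model not in models: models.insert(0, model)
  let models :=
    if preferred_models ≠ [] then
      preferred_models.foldl (fun ms m => if ms.contains m then ms else m :: ms) models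
    else models
  models.take 3

-- ===== PORT B =====
def CATEGORY_TAG_LISTS : List (List String) :=
  [TECHNICAL_TAGS, CREATIVE_TAGS, FACTUAL_TAGS, COMPARISON_TAGS, EXPLANATION_TAGS]

def MODELS_BY_CATEGORY : List (List String) :=
  [ ["gpt4", "claude3"],
    ["claude3", "gemini"],
    ["gpt4", "claude3"],
    ["gpt4", "claude3", "gemini"],
    ["gpt4", "claude3"],
    ["gpt-3.5-turbo", "gpt4"] ]

-- {t: i for i, ts in enumerate(_CATEGORY_TAG_LISTS) for t in ts}
def TAG_CATEGORY : PySem.Dict String Int :=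
  (PySem.List.enumerate CATEGORY_TAG_LISTS).foldl
    (fun d p => p.2.foldl (fun d t => PySem.Dict.insert d t p.1) d) PySem.Dict.empty

def select_models_for_query_alt (query : String) (user_prefs : List (String × List String)) (context : List (String × List String)) : List String :=
  let idx : Int := (PySem.Dict.getD (PySem.Dict.mk context) "tags" []).foldl
      (fun i t => min i (PySem.Dict.getD TAG_CATEGORY t 5)) 5
  -- idx is always in [0, 5], so the pyGet? below is never none; .getD [] is never taken
  let models := (PySem.List.pyGet? MODELS_BY_CATEGORY idx).getD []
  let newOnes := (PySem.Dict.getD (PySem.Dict.mk user_prefs) "preferred_models" []).filter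
      (fun m => !(models.contains m))
  let front := (PySem.List.dedup newOnes).reverse
  (front ++ models).take 3

-- ===== PRECONDITION & SPEC =====
def Spec_select_models_for_query (query : String) (user_prefs : List (String × List String)) (context : List (String × List String)) (out : List String) : Prop := out = select_models_for_query_alt query user_prefs context
instance (query : String) (user_prefs : List (String × List String)) (context : List (String × List String)) (out : List String) : Decidable (Spec_select_models_for_query query user_prefs context out) := by unfold Spec_select_models_for_query; infer_instance

-- ===== CLAIM (what is proved, stated in full; the proofs are below) =====
def Claim_equal_select_models_for_query : Prop := ∀ (query : String) (user_prefs : List (String × List String)) (context : List (String × List String)), Dom_select_models_for_query query user_prefs context → Spec_select_models_for_query query user_prefs context (select_models_for_query query user_prefs context)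

-- ===== LEMMAS AND PROOFS =====

-- category index of a single tag, written as a membership chain
def catChain (t : String) : Int :=
  if TECHNICAL_TAGS.contains t then 0
  else if CREATIVE_TAGS.contains t then 1
  else if FACTUAL_TAGS.contains t then 2
  else if COMPARISON_TAGS.contains t then 3
  else if EXPLANATION_TAGS.contains t then 4
  else 5

-- category index chosen by A's if/elif chain over a whole tag list
def chainIdx (tags : List String) : Int :=
  if tags.any (fun tag => TECHNICAL_TAGS.contains tag) then 0
  else if tags.any (fun tag => CREATIVE_TAGS.contains tag) then 1
  else if tags.any (fun tag => FACTUAL_TAGS.contains tag) then 2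
  else if tags.any (fun tag => COMPARISON_TAGS.contains tag) then 3
  else if tags.any (fun tag => EXPLANATION_TAGS.contains tag) then 4
  else 5

theorem TAG_CATEGORY_eq : TAG_CATEGORY = PySem.Dict.mk
    [("code", 0), ("programming", 0), ("technical", 0), ("algorithm", 0), ("science", 0), ("math", 0),
     ("creative", 1), ("writing", 1), ("story", 1), ("design", 1), ("artistic", 1), ("novel", 1),
     ("facts", 2), ("history", 2), ("data", 2), ("information", 2), ("research", 2),
     ("comparison", 3), ("contrast", 3), ("versus", 3), ("vs", 3), ("difference", 3), ("compare", 3),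
     ("explain", 4), ("explanation", 4), ("describe", 4), ("clarify", 4), ("elaborate", 4)] := by
  decide

theorem getD_TAG_CATEGORY (t : String) : PySem.Dict.getD TAG_CATEGORY t 5 = catChain t := by
  by_cases h1 : t ∈ TECHNICAL_TAGS
  · simp only [TECHNICAL_TAGS, List.mem_cons, List.not_mem_nil, or_false] at h1
    rcases h1 with rfl | rfl | rfl | rfl | rfl | rfl <;> decide
  · by_cases h2 : t ∈ CREATIVE_TAGS
    · simp only [CREATIVE_TAGS, List.mem_cons, List.not_mem_nil, or_false] at h2
      rcases h2 with rfl | rfl | rfl | rfl | rfl | rfl <;> decide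
    · by_cases h3 : t ∈ FACTUAL_TAGS
      · simp only [FACTUAL_TAGS, List.mem_cons, List.not_mem_nil, or_false] at h3
        rcases h3 with rfl | rfl | rfl | rfl | rfl <;> decide
      · by_cases h4 : t ∈ COMPARISON_TAGS
        · simp only [COMPARISON_TAGS, List.mem_cons, List.not_mem_nil, or_false] at h4
          rcases h4 with rfl | rfl | rfl | rfl | rfl | rfl <;> decide
        · by_cases h5 : t ∈ EXPLANATION_TAGS
          · simp only [EXPLANATION_TAGS, List.mem_cons, List.not_mem_nil, or_false] at h5
            rcases h5 with rfl | rfl | rfl | rfl | rfl <;> decide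
          · have hc : catChain t = 5 := by
              simp [catChain, List.contains_eq_mem, h1, h2, h3, h4, h5]
            rw [hc, TAG_CATEGORY_eq]
            simp only [TECHNICAL_TAGS, CREATIVE_TAGS, FACTUAL_TAGS, COMPARISON_TAGS,
              EXPLANATION_TAGS, List.mem_cons, List.not_mem_nil, or_false, not_or] at h1 h2 h3 h4 h5
            obtain ⟨n1, n2, n3, n4, n5, n6⟩ := h1
            obtain ⟨m1, m2, m3, m4, m5, m6⟩ := h2
            obtain ⟨f1, f2, f3, f4, f5⟩ := h3
            obtain ⟨c1, c2, c3, c4, c5, c6⟩ := h4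
            obtain ⟨e1, e2, e3, e4, e5⟩ := h5
            simp [PySem.Dict.getD_eq_get?_getD, PySem.Dict.get?_mk_cons, PySem.Dict.get?,
              PySem.Dict.getD,
              beq_iff_eq, Ne.symm n1, Ne.symm n2, Ne.symm n3, Ne.symm n4, Ne.symm n5, Ne.symm n6,
              Ne.symm m1, Ne.symm m2, Ne.symm m3, Ne.symm m4, Ne.symm m5, Ne.symm m6,
              Ne.symm f1, Ne.symm f2, Ne.symm f3, Ne.symm f4, Ne.symm f5,
              Ne.symm c1, Ne.symm c2, Ne.symm c3, Ne.symm c4, Ne.symm c5, Ne.symm c6,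
              Ne.symm e1, Ne.symm e2, Ne.symm e3, Ne.symm e4, Ne.symm e5]

theorem catChain_le (t : String) : catChain t ≤ 5 := by
  unfold catChain; split_ifs <;> norm_num

theorem chainIdx_le (tags : List String) : chainIdx tags ≤ 5 := by
  unfold chainIdx; split_ifs <;> norm_num

set_option maxHeartbeats 4000000 in
theorem chainIdx_cons (t : String) (rest : List String) :
    chainIdx (t :: rest) = min (catChain t) (chainIdx rest) := by
  by_cases h1 : t ∈ TECHNICAL_TAGS <;>
  by_cases h2 : t ∈ CREATIVE_TAGS <;>
  by_cases h3 : t ∈ FACTUAL_TAGS <;>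
  by_cases h4 : t ∈ COMPARISON_TAGS <;>
  by_cases h5 : t ∈ EXPLANATION_TAGS <;>
  by_cases r1 : ∃ x ∈ rest, x ∈ TECHNICAL_TAGS <;>
  by_cases r2 : ∃ x ∈ rest, x ∈ CREATIVE_TAGS <;>
  by_cases r3 : ∃ x ∈ rest, x ∈ FACTUAL_TAGS <;>
  by_cases r4 : ∃ x ∈ rest, x ∈ COMPARISON_TAGS <;>
  by_cases r5 : ∃ x ∈ rest, x ∈ EXPLANATION_TAGS <;>
  simp [chainIdx, catChain, List.any_cons, List.contains_eq_mem, List.any_eq_true,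
    h1, h2, h3, h4, h5, r1, r2, r3, r4, r5, min_def]

theorem foldmin (tags : List String) (acc : Int) (h : acc ≤ 5) :
    tags.foldl (fun i t => min i (catChain t)) acc
      = min acc (chainIdx tags) := by
  induction tags generalizing acc with
  | nil => simp [chainIdx]; omega
  | cons t rest ih =>
    rw [List.foldl_cons, ih (min acc (catChain t)) (by have := catChain_le t; omega),
        chainIdx_cons, min_assoc]

-- A's if/elif chain with default equals B's indexed lookup at chainIdx
theorem base_eq (tags : List String) :
    (let models : List String :=
      if tags.any (fun tag => TECHNICAL_TAGS.contains tag) then ["gpt4", "claude3"]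
      else if tags.any (fun tag => CREATIVE_TAGS.contains tag) then ["claude3", "gemini"]
      else if tags.any (fun tag => FACTUAL_TAGS.contains tag) then ["gpt4", "claude3"]
      else if tags.any (fun tag => COMPARISON_TAGS.contains tag) then ["gpt4", "claude3", "gemini"]
      else if tags.any (fun tag => EXPLANATION_TAGS.contains tag) then ["gpt4", "claude3"]
      else []
     if models = [] then ["gpt-3.5-turbo", "gpt4"] else models)
    = (PySem.List.pyGet? MODELS_BY_CATEGORY (chainIdx tags)).getD [] := by
  simp only [chainIdx]
  cases a1 : tags.any (fun tag => TECHNICAL_TAGS.contains tag) <;>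
  cases a2 : tags.any (fun tag => CREATIVE_TAGS.contains tag) <;>
  cases a3 : tags.any (fun tag => FACTUAL_TAGS.contains tag) <;>
  cases a4 : tags.any (fun tag => COMPARISON_TAGS.contains tag) <;>
  cases a5 : tags.any (fun tag => EXPLANATION_TAGS.contains tag) <;> decide

-- A's insert-at-front fold equals B's filter + ordered-dedup, reversed and prepended
theorem fold_insert_eq (prefs : List String) (front s : List String) :
    prefs.foldl (fun ms m => if ms.contains m then ms else m :: ms) (front.reverse ++ s)
      = ((prefs.filter (fun m => !(s.contains m))).foldl PySem.Set.add front).reverse ++ s := by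
  induction prefs generalizing front with
  | nil => rfl
  | cons m rest ih =>
    simp only [List.foldl_cons, List.filter_cons]
    by_cases hs : m ∈ s
    · rw [if_pos (by simp [List.contains_eq_mem, hs]),
          if_neg (by simp [List.contains_eq_mem, hs])]
      exact ih front
    · by_cases hf : m ∈ front
      · rw [if_pos (by simp [List.contains_eq_mem, hs, hf]),
            if_pos (by simp [List.contains_eq_mem, hs])]
        simp only [List.foldl_cons, PySem.Set.add_of_mem hf]
        exact ih front
      · rw [if_neg (by simp [List.contains_eq_mem, hs, hf]),
            if_pos (by simp [List.contains_eq_mem, hs])]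
        simp only [List.foldl_cons, PySem.Set.add_of_not_mem hf]
        have : m :: (front.reverse ++ s) = (front ++ [m]).reverse ++ s := by simp
        rw [this]
        exact ih (front ++ [m])

-- ===== VERDICT (by name: the statement is the Claim_ definition above) =====
theorem select_models_for_query_spec : Claim_equal_select_models_for_query := by
  intro query user_prefs context _
  unfold Spec_select_models_for_query select_models_for_query select_models_for_query_alt
  generalize PySem.Dict.getD (PySem.Dict.mk context) "tags" [] = tags
  generalize PySem.Dict.getD (PySem.Dict.mk user_prefs) "preferred_models" [] = prefs
  simp only [getD_TAG_CATEGORY]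
  rw [foldmin tags 5 (le_refl 5), min_eq_right (chainIdx_le tags), base_eq tags]
  generalize (PySem.List.pyGet? MODELS_BY_CATEGORY (chainIdx tags)).getD [] = models
  have key := fold_insert_eq prefs [] models
  simp only [List.reverse_nil, List.nil_append] at key
  by_cases hp : prefs = []
  · subst hp; simp
  · rw [if_pos hp, key, PySem.List.dedup_eq_ofList, PySem.Set.ofList_eq_foldl]
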